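-- pv_equiv track=rewrite | github.com/kshmawj111/programmers | lv2/조이스틱.py | calculate_min_left_right
-- ===== SOURCE A (Python) =====
-- def calculate_min_left_right(name):
--     num_A_observed = 0
--     total_moves = 0
--
--     if isinstance(name, str):
--         for char in name:
--             if char == 'A':
--                 num_A_observed += 1
--
--             else:
--                 total_moves += num_A_observed + 1
--                 num_A_observed = 0
--
--         return total_moves
--
--     elif isinstance(name, list):
--         for e in name:
--             if e == 0:
--                 num_A_observed += 1
--
--             else:
--                 total_moves += num_A_observed + 1
--                 num_A_observed = 0
--
--         return total_moves
-- ===== SOURCE B (Python) =====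
-- def calculate_min_left_right(name):
--     if isinstance(name, str):
--         return len(name.rstrip('A'))
--     elif isinstance(name, list):
--         i = len(name)
--         while i > 0 and name[i - 1] == 0:
--             i -= 1
--         return i
-- ===== Notes on version B (the rewrite author's own statement) =====
-- stated objective: simpler
-- what changed: Replaces the accumulate-run-lengths fold over the whole input with the observation that the result is the length after stripping the trailing run of sentinels: rstrip('A') for strings, a reverse scan dropping trailing zeros for lists.
import Mathlib
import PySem

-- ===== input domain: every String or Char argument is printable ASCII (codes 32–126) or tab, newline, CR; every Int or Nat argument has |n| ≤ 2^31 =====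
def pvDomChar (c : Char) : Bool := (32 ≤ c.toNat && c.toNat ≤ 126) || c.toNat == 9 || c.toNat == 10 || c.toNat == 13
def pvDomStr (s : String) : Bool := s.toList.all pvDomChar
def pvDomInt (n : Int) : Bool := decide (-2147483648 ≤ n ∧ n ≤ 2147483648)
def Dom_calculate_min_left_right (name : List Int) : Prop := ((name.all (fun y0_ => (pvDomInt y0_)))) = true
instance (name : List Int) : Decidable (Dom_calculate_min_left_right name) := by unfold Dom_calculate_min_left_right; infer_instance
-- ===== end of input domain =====

-- B strips the trailing run of zeros and returns the remaining length instead of A's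
-- fold that accumulates zero-run lengths; same O(n) cost, simpler.

-- ===== PORT A =====
-- the list branch of A: fold carrying (num_A_observed, total_moves)
def pvLoopA : List Int → Int → Int → Int
  | [], _, t => t
  | e :: rest, a, t =>
    if e == 0 then pvLoopA rest (a + 1) t
    else pvLoopA rest 0 (t + a + 1)

def calculate_min_left_right (name : List Int) : Int :=
  pvLoopA name 0 0

-- ===== PORT B =====
-- B's list branch: i = len(name); while i > 0 and name[i-1] == 0: i -= 1; return i
-- i.e. drop the trailing zeros (a scan from the right) and return the remaining length.
def calculate_min_left_right_alt (name : List Int) : Int :=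
  Int.ofNat (name.reverse.dropWhile (fun e => e == 0)).length

-- ===== PRECONDITION & SPEC =====
def Spec_calculate_min_left_right (name : List Int) (out : Int) : Prop := out = calculate_min_left_right_alt name
instance (name : List Int) (out : Int) : Decidable (Spec_calculate_min_left_right name out) := by unfold Spec_calculate_min_left_right; infer_instance

-- ===== CLAIM (what is proved, stated in full; the proofs are below) =====
def Claim_equal_calculate_min_left_right : Prop := ∀ (name : List Int), Dom_calculate_min_left_right name → Spec_calculate_min_left_right name (calculate_min_left_right name)

-- ===== LEMMAS AND PROOFS =====

-- structural "length after stripping trailing zeros", used to bridge the two ports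
def pvStrip : List Int → Nat
  | [] => 0
  | x :: xs => if pvStrip xs = 0 ∧ x = 0 then 0 else pvStrip xs + 1

theorem pvLoopA_eq (l : List Int) : ∀ (a t : Int),
    pvLoopA l a t = t + (if pvStrip l = 0 then 0 else a + pvStrip l) := by
  induction l with
  | nil => intro a t; simp [pvLoopA, pvStrip]
  | cons x xs ih =>
    intro a t
    by_cases hx : x = 0
    · subst hx
      simp only [pvLoopA, beq_self_eq_true, if_true]
      rw [ih]
      by_cases hs : pvStrip xs = 0
      · simp [pvStrip, hs]
      · simp only [pvStrip, hs, false_and, if_false]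
        have : ¬ (pvStrip xs + 1 = 0) := by omega
        simp only [this, if_false]
        push_cast
        ring
    · simp only [pvLoopA, beq_iff_eq, hx, if_false]
      rw [ih]
      have hsx : pvStrip (x :: xs) = pvStrip xs + 1 := by
        simp [pvStrip, hx]
      rw [hsx]
      have : ¬ (pvStrip xs + 1 = 0) := by omega
      simp only [this, if_false]
      by_cases hs : pvStrip xs = 0
      · simp [hs]; ring
      · simp only [hs, if_false]
        push_cast
        ring

theorem pvStrip_eq (l : List Int) :
    pvStrip l = (l.reverse.dropWhile (fun e => e == 0)).length := by
  induction l with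
  | nil => simp [pvStrip]
  | cons x xs ih =>
    simp only [List.reverse_cons]
    rw [List.dropWhile_append]
    by_cases hd : (xs.reverse.dropWhile (fun e => e == 0)) = []
    · have h0 : pvStrip xs = 0 := by rw [ih, hd]; rfl
      by_cases hx : x = 0
      · subst hx
        simp [pvStrip, h0, hd, List.dropWhile]
      · have hb : (x == 0) = false := by simpa using hx
        simp [pvStrip, h0, hx, hd, List.dropWhile, hb]
    · have hs : pvStrip xs ≠ 0 := by rw [ih]; simpa using hd
      have hlen : (List.dropWhile (fun e => e == 0) xs.reverse ++ [x]).length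
          = (List.dropWhile (fun e => e == 0) xs.reverse).length + 1 := by simp
      simp only [List.isEmpty_iff, hd, if_false, hlen, ← ih]
      by_cases hx : x = 0
      · simp [pvStrip, hs, hx]
      · simp [pvStrip, hx]

-- ===== VERDICT (by name: the statement is the Claim_ definition above) =====
theorem calculate_min_left_right_spec : Claim_equal_calculate_min_left_right := by
  intro name _
  unfold Spec_calculate_min_left_right calculate_min_left_right calculate_min_left_right_alt
  rw [pvLoopA_eq, ← pvStrip_eq]
  by_cases hs : pvStrip name = 0 <;> simp [hs]
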